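-- pv_equiv track=rewrite | github.com/jeremy63s/Crackle-Gene | src/my_project/pipeline/__init__.py | translate_nuc_row_active
-- ===== SOURCE A (Python) =====
-- def translate_nuc_row_active(nuc_row, codon_table):
--     """
--     Translates a nucleotide row into an amino acid row—but only within active coding regions.
--     An active coding region is defined as a series of complete codons that starts with the start codon (ATG)
--     and continues until a stop codon (TAA, TAG, or TGA) is reached. Codons outside these regions (or incomplete codons)
--     are marked with '0'.
--
--     Each amino acid translation is repeated in the three positions that made up its codon.
--
--     Parameters:
--       nuc_row (list): List or array of single-character nucleotide strings (e.g., ['A','T','G',...]).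
--       codon_table (dict): Dictionary mapping codon strings to their corresponding single-letter amino acid codes.
--
--     Returns:
--       list: A list the same length as nuc_row containing the amino acid letters for coding positions and '0' elsewhere.
--     """
--     # Initialize output with '0'
--     output = ['0'] * len(nuc_row)
--     # Collect indices for valid nucleotides (ignoring gaps '-' and ambiguous 'N')
--     valid_indices = [i for i, nt in enumerate(nuc_row) if nt.upper() not in ['-', 'N']]
--
--     inside_coding = False
--     # Process the valid indices in groups of three (complete codons)
--     for i in range(len(valid_indices) // 3):
--         indices = valid_indices[3 * i: 3 * i + 3]
--         codon = ''.join(nuc_row[idx] for idx in indices).upper()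
--
--         if not inside_coding:
--             # Check if the codon is a start codon (ATG)
--             if codon == "ATG":
--                 inside_coding = True
--                 aa = codon_table.get(codon, '0')
--                 for idx in indices:
--                     output[idx] = aa
--             # If not in coding region, leave these positions as '0'
--         else:
--             # Inside an active coding region: translate this codon
--             aa = codon_table.get(codon, '0')
--             for idx in indices:
--                 output[idx] = aa
--             # If a stop codon is encountered, mark the end of the coding region after translating it
--             if codon in ["TAA", "TAG", "TGA"]:
--                 inside_coding = False
--     return output
-- ===== SOURCE B (Python) =====
-- def translate_nuc_row_active(nuc_row, codon_table):
--     """Single forward pass: stream nucleotides, buffering valid indices until a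
--     full codon accumulates, instead of precomputing valid_indices and slicing."""
--     output = ['0'] * len(nuc_row)
--     buffer = []
--     inside_coding = False
--     for i, nt in enumerate(nuc_row):
--         if nt.upper() in ('-', 'N'):
--             continue
--         buffer.append(i)
--         if len(buffer) < 3:
--             continue
--         codon = ''.join(nuc_row[idx] for idx in buffer).upper()
--         if inside_coding:
--             aa = codon_table.get(codon, '0')
--             for idx in buffer:
--                 output[idx] = aa
--             if codon in ("TAA", "TAG", "TGA"):
--                 inside_coding = False
--         elif codon == "ATG":
--             inside_coding = True
--             aa = codon_table.get(codon, '0')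
--             for idx in buffer:
--                 output[idx] = aa
--         buffer = []
--     return output
-- ===== Notes on version B (the rewrite author's own statement) =====
-- stated objective: alternative
-- what changed: Replaced the two-phase scheme (precompute valid_indices, then loop over len//3 slices of it) by a single streaming pass over nuc_row that buffers valid indices and fires the identical codon state machine each time the buffer reaches three.
import Mathlib
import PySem

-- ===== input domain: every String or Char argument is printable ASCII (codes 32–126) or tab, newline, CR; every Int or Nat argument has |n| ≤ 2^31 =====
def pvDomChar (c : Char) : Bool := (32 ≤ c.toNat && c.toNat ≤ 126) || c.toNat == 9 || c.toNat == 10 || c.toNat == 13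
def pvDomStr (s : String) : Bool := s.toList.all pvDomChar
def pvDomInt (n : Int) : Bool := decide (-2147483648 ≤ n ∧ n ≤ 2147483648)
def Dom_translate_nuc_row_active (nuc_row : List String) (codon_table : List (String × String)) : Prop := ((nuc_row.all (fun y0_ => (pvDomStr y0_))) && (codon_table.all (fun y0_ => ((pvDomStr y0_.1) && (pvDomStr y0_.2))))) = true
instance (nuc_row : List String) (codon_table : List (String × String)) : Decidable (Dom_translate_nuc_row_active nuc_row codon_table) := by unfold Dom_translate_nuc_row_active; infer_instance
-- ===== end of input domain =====

-- B replaces A's two-phase scheme (precompute valid_indices, loop over len//3 slices of it)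
-- by one streaming pass that buffers valid indices until a full codon accumulates (alternative decomposition).

-- ===== PORT A =====
def translate_nuc_row_active (nuc_row : List String) (codon_table : List (String × String)) : List String :=
  -- output = ['0'] * len(nuc_row); valid_indices = [i for i, nt in enumerate(...) if nt.upper() not in ['-','N']]
  let output : List String := List.replicate nuc_row.length "0"
  let valid_indices : List Int :=
    ((PySem.List.enumerate nuc_row 0).filter
      (fun p => !(["-", "N"].contains (PySem.Str.upper p.2)))).map (·.1)
  -- for i in range(len(valid_indices) // 3): …   (loop state = (output, inside_coding))
  ((List.range (valid_indices.length / 3)).foldl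
    (fun (st : List String × Bool) (i : Nat) =>
      let indices : List Int :=
        PySem.List.slice valid_indices (some (3 * (i : Int))) (some (3 * (i : Int) + 3))
      let codon : String :=
        PySem.Str.upper (PySem.Str.join "" (indices.map (fun idx => PySem.List.pyGetD nuc_row idx "")))
      if !st.2 then
        if codon == "ATG" then
          let aa := (PySem.Dict.ofList codon_table).getD codon "0"
          (indices.foldl (fun o idx => PySem.List.pySetD o idx aa) st.1, true)
        else st
      else
        let aa := (PySem.Dict.ofList codon_table).getD codon "0"
        let o := indices.foldl (fun o idx => PySem.List.pySetD o idx aa) st.1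
        if ["TAA", "TAG", "TGA"].contains codon then (o, false) else (o, true))
    (output, false)).1

-- ===== PORT B =====
-- the streaming loop of Source B: buffer of valid indices, output written in place, inside_coding flag
def altLoop (nuc_row : List String) (codon_table : List (String × String)) :
    List (Int × String) → List Int → List String → Bool → List String
  | [], _, out, _ => out
  | (i, nt) :: rest, buf, out, ins =>
    if ["-", "N"].contains (PySem.Str.upper nt) then
      altLoop nuc_row codon_table rest buf out ins
    else
      let buf' := buf ++ [i]
      if buf'.length < 3 then
        altLoop nuc_row codon_table rest buf' out ins
      else
        let codon : String :=
          PySem.Str.upper (PySem.Str.join "" (buf'.map (fun idx => PySem.List.pyGetD nuc_row idx "")))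
        if ins then
          let aa := (PySem.Dict.ofList codon_table).getD codon "0"
          let o := buf'.foldl (fun o idx => PySem.List.pySetD o idx aa) out
          altLoop nuc_row codon_table rest [] o (!(["TAA", "TAG", "TGA"].contains codon))
        else if codon == "ATG" then
          let aa := (PySem.Dict.ofList codon_table).getD codon "0"
          altLoop nuc_row codon_table rest []
            (buf'.foldl (fun o idx => PySem.List.pySetD o idx aa) out) true
        else
          altLoop nuc_row codon_table rest [] out ins

def translate_nuc_row_active_alt (nuc_row : List String) (codon_table : List (String × String)) : List String :=
  altLoop nuc_row codon_table (PySem.List.enumerate nuc_row 0) []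
    (List.replicate nuc_row.length "0") false

-- ===== PRECONDITION & SPEC =====
def Spec_translate_nuc_row_active (nuc_row : List String) (codon_table : List (String × String)) (out : List String) : Prop := out = translate_nuc_row_active_alt nuc_row codon_table
instance (nuc_row : List String) (codon_table : List (String × String)) (out : List String) : Decidable (Spec_translate_nuc_row_active nuc_row codon_table out) := by unfold Spec_translate_nuc_row_active; infer_instance

-- ===== CLAIM (what is proved, stated in full; the proofs are below) =====
def Claim_equal_translate_nuc_row_active : Prop := ∀ (nuc_row : List String) (codon_table : List (String × String)), Dom_translate_nuc_row_active nuc_row codon_table → Spec_translate_nuc_row_active nuc_row codon_table (translate_nuc_row_active nuc_row codon_table)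

-- ===== LEMMAS AND PROOFS =====

-- proof-level abbreviations for the codon of a triple and the triple write-back
def codonOf (nuc_row : List String) (idxs : List Int) : String :=
  PySem.Str.upper (PySem.Str.join "" (idxs.map (fun idx => PySem.List.pyGetD nuc_row idx "")))

def writeAA (nuc_row : List String) (codon_table : List (String × String))
    (out : List String) (idxs : List Int) : List String :=
  idxs.foldl (fun o idx =>
    PySem.List.pySetD o idx ((PySem.Dict.ofList codon_table).getD (codonOf nuc_row idxs) "0")) out

-- the codon state machine applied to one triple of indices (reference machine;
-- its body is definitionally A's loop body)
def chunkStep (nuc_row : List String) (codon_table : List (String × String))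
    (st : List String × Bool) (indices : List Int) : List String × Bool :=
  let codon : String :=
    PySem.Str.upper (PySem.Str.join "" (indices.map (fun idx => PySem.List.pyGetD nuc_row idx "")))
  if !st.2 then
    if codon == "ATG" then
      let aa := (PySem.Dict.ofList codon_table).getD codon "0"
      (indices.foldl (fun o idx => PySem.List.pySetD o idx aa) st.1, true)
    else st
  else
    let aa := (PySem.Dict.ofList codon_table).getD codon "0"
    let o := indices.foldl (fun o idx => PySem.List.pySetD o idx aa) st.1
    if ["TAA", "TAG", "TGA"].contains codon then (o, false) else (o, true)

-- B's three-way branch order computes chunkStep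
lemma chunkStep_eq (nr : List String) (ct : List (String × String))
    (out : List String) (ins : Bool) (idxs : List Int) :
    chunkStep nr ct (out, ins) idxs =
      (if ins then
        (writeAA nr ct out idxs, !(["TAA", "TAG", "TGA"].contains (codonOf nr idxs)))
      else if codonOf nr idxs == "ATG" then (writeAA nr ct out idxs, true)
      else (out, ins)) := by
  cases ins with
  | false =>
    by_cases hc : (codonOf nr idxs == "ATG") = true <;>
      simp_all [chunkStep, codonOf, writeAA]
  | true =>
    by_cases hs : (["TAA", "TAG", "TGA"].contains (codonOf nr idxs)) = true <;>
      simp_all [chunkStep, codonOf, writeAA]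

-- one-step unfolding of B's loop, with the abbreviations in place (definitional)
lemma altLoop_cons (nr : List String) (ct : List (String × String)) (i : Int) (nt : String)
    (rest : List (Int × String)) (buf : List Int) (out : List String) (ins : Bool) :
    altLoop nr ct ((i, nt) :: rest) buf out ins =
      if ["-", "N"].contains (PySem.Str.upper nt) then
        altLoop nr ct rest buf out ins
      else if (buf ++ [i]).length < 3 then
        altLoop nr ct rest (buf ++ [i]) out ins
      else if ins then
        altLoop nr ct rest [] (writeAA nr ct out (buf ++ [i]))
          (!(["TAA", "TAG", "TGA"].contains (codonOf nr (buf ++ [i]))))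
      else if codonOf nr (buf ++ [i]) == "ATG" then
        altLoop nr ct rest [] (writeAA nr ct out (buf ++ [i])) true
      else
        altLoop nr ct rest [] out ins := rfl

-- complete groups of three, as A's slicing carves them out of valid_indices
def chunks3 : List Int → List (List Int)
  | a :: b :: c :: r => [a, b, c] :: chunks3 r
  | _ => []

lemma slice3 (xs : List Int) (k : Nat) :
    PySem.List.slice xs (some (3 * (k : Int))) (some (3 * (k : Int) + 3)) =
      (xs.drop (3 * k)).take 3 := by
  have h1 : (3 * (k : Int)) = ((3 * k : Nat) : Int) := by push_cast; ring
  have h2 : (3 * (k : Int) + 3) = ((3 * k + 3 : Nat) : Int) := by push_cast; ring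
  rw [h2, h1, PySem.List.slice_natCast]
  congr 1
  omega

-- A's slice-indexed loop over range(len//3) is the fold over the list of complete triples
lemma foldl_range_slices (nr : List String) (ct : List (String × String)) :
    ∀ (xs : List Int) (st : List String × Bool),
      (List.range (xs.length / 3)).foldl
        (fun (st : List String × Bool) (i : Nat) => chunkStep nr ct st
          (PySem.List.slice xs (some (3 * (i : Int))) (some (3 * (i : Int) + 3)))) st =
      (chunks3 xs).foldl (chunkStep nr ct) st := by
  intro xs
  induction xs using chunks3.induct with
  | case1 a b c r ih =>
    intro st
    have hlen : (a :: b :: c :: r).length / 3 = r.length / 3 + 1 := by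
      simp only [List.length_cons]; omega
    rw [hlen, List.range_succ_eq_map, List.foldl_cons, List.foldl_map]
    have h0 : PySem.List.slice (a :: b :: c :: r) (some (3 * ((0 : Nat) : Int)))
        (some (3 * ((0 : Nat) : Int) + 3)) = [a, b, c] := by rw [slice3]; rfl
    rw [h0, show chunks3 (a :: b :: c :: r) = [a, b, c] :: chunks3 r from rfl, List.foldl_cons,
      ← ih (chunkStep nr ct st [a, b, c])]
    apply PySem.List.foldl_congr_mem
    intro s i _
    congr 1
    rw [slice3, slice3]
    have h3 : 3 * (i + 1) = 3 * i + 1 + 1 + 1 := by omega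
    rw [h3]
    simp [List.drop_succ_cons]
  | case2 xs h =>
    intro st
    have hlen : xs.length / 3 = 0 := by
      match xs, h with
      | [], _ => rfl
      | [_], _ => simp
      | [_, _], _ => simp
      | a :: b :: c :: r, h => exact absurd rfl (h a b c r)
    have hch : chunks3 xs = [] := by
      match xs, h with
      | [], _ => rfl
      | [_], _ => rfl
      | [_, _], _ => rfl
      | a :: b :: c :: r, h => exact absurd rfl (h a b c r)
    rw [hlen, hch]; rfl

-- B's streaming loop with a partial buffer computes the chunk fold of buffer ++ remaining valid indices
lemma altLoop_eq_chunks (nr : List String) (ct : List (String × String)) :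
    ∀ (l : List (Int × String)) (buf : List Int) (out : List String) (ins : Bool),
      buf.length ≤ 2 →
      altLoop nr ct l buf out ins =
        ((chunks3 (buf ++ (l.filter
            (fun p => !(["-", "N"].contains (PySem.Str.upper p.2)))).map (·.1))).foldl
          (chunkStep nr ct) (out, ins)).1 := by
  intro l
  induction l with
  | nil =>
    intro buf out ins hb
    have hch : chunks3 (buf ++ []) = [] := by
      match buf, hb with
      | [], _ => rfl
      | [_], _ => rfl
      | [_, _], _ => rfl
    rw [show ((([] : List (Int × String)).filter
        (fun p => !(["-", "N"].contains (PySem.Str.upper p.2)))).map (·.1)) = [] from rfl, hch]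
    rfl
  | cons p rest ih =>
    obtain ⟨i, nt⟩ := p
    intro buf out ins hb
    rw [altLoop_cons]
    by_cases h : (["-", "N"].contains (PySem.Str.upper nt)) = true
    · rw [if_pos h, List.filter_cons_of_neg (by simp at h ⊢; tauto)]
      exact ih buf out ins hb
    · rw [if_neg h, List.filter_cons_of_pos (by simpa using h), List.map_cons]
      match buf, hb with
      | [], _ =>
        rw [if_pos (by simp)]
        exact ih [i] out ins (by simp)
      | [a], _ =>
        rw [if_pos (by simp)]
        exact ih [a, i] out ins (by simp)
      | [a, b], _ =>
        rw [if_neg (by simp),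
          show chunks3 ([a, b] ++ i :: (rest.filter
            (fun p => !(["-", "N"].contains (PySem.Str.upper p.2)))).map (·.1)) =
            ([a, b] ++ [i]) :: chunks3 ((rest.filter
            (fun p => !(["-", "N"].contains (PySem.Str.upper p.2)))).map (·.1)) from rfl,
          List.foldl_cons, chunkStep_eq]
        cases ins with
        | true =>
          rw [if_pos rfl, if_pos rfl]
          exact ih [] _ _ (by simp)
        | false =>
          have hfalse : ¬((false : Bool) = true) := by simp
          rw [if_neg hfalse, if_neg hfalse]
          by_cases hc : (codonOf nr ([a, b] ++ [i]) == "ATG") = true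
          · rw [if_pos hc, if_pos hc]
            exact ih [] _ _ (by simp)
          · rw [if_neg hc, if_neg hc]
            exact ih [] out false (by simp)

-- ===== VERDICT (by name: the statement is the Claim_ definition above) =====
theorem translate_nuc_row_active_spec : Claim_equal_translate_nuc_row_active := by
  intro nuc_row codon_table _
  show translate_nuc_row_active nuc_row codon_table = translate_nuc_row_active_alt nuc_row codon_table
  rw [translate_nuc_row_active, translate_nuc_row_active_alt,
    altLoop_eq_chunks nuc_row codon_table _ [] _ false (by simp)]
  exact congrArg Prod.fst (foldl_range_slices nuc_row codon_table _ _)
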